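-- pv_equiv track=rewrite | github.com/FachiHD/TruthTableCreator | solver.py | check_surrounded
-- ===== SOURCE A (Python) =====
-- OPENING_BRACKET = "("
--
-- CLOSING_BRACKET = ")"
--
-- def check_surrounded(string):
--     """ Check if the string as a whole is surrounded by brackets
--
--     :param string: The string to check.
--     :return: True if it is surrounded.
--     """
--     length = len(string)
--     counter = 0
--     for idx in range(length):
--         char = string[idx]
--         if char == OPENING_BRACKET:
--             counter += 1
--         elif char == CLOSING_BRACKET:
--             counter -= 1
--
--         # return the string if we exited all brackets but have not looped through the entire string
--         # meaning there are no more brackets around the entire string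
--         if counter == 0 and idx != length - 1:
--             return False
--     return True
-- ===== SOURCE B (Python) =====
-- def _delta(c):
--     return 1 if c == "(" else -1 if c == ")" else 0
--
--
-- def check_surrounded(string):
--     """Check if the string as a whole is surrounded by brackets.
--
--     Different algorithm: instead of testing each prefix balance against zero
--     with an early exit, maintain the running MIN and MAX of the prefix
--     balances over positions 0..len-2 and decide with one interval test at
--     the end.  Correct by the discrete intermediate value theorem: each step
--     changes the balance by at most 1, so the balance hits 0 somewhere in
--     that range iff 0 lies within [lo, hi].
--     """
--     if len(string) <= 1:
--         return True
--     bal = _delta(string[0])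
--     lo = hi = bal
--     for c in string[1:-1]:
--         bal += _delta(c)
--         lo = min(lo, bal)
--         hi = max(hi, bal)
--     return not (lo <= 0 <= hi)
-- ===== Notes on version B (the rewrite author's own statement) =====
-- stated objective: alternative
-- what changed: Instead of testing each running balance for zero with an early exit, B maintains only the running min and max of the prefix balances over positions 0..len-2 and decides with a single final interval test lo <= 0 <= hi, correct by the discrete intermediate value theorem (each step changes the balance by at most 1).
import Mathlib
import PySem

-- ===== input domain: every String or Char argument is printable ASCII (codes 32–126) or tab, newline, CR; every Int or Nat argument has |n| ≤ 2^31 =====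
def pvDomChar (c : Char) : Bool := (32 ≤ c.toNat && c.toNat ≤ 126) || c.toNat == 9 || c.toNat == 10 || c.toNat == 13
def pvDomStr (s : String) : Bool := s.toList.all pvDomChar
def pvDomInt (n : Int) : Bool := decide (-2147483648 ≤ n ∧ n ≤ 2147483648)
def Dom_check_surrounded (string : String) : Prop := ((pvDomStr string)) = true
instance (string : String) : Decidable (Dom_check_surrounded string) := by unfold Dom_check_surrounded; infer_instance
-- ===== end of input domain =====

-- B replaces A's zero-test-with-early-exit scan by running min/max extrema of the prefix
-- balances plus one final interval test (discrete intermediate value theorem); same return value.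

-- ===== PORT A =====
-- loop over the characters, carrying counter and the current index idx; length is the total length
def check_surrounded_loop (cs : List Char) (counter : Int) (idx : Nat) (length : Nat) : Bool :=
  match cs with
  | [] => true
  | c :: rest =>
    let counter' := if c = '(' then counter + 1 else if c = ')' then counter - 1 else counter
    if counter' = 0 ∧ idx ≠ length - 1 then false
    else check_surrounded_loop rest counter' (idx + 1) length

def check_surrounded (string : String) : Bool :=
  check_surrounded_loop string.toList 0 0 string.toList.length

-- ===== PORT B =====
-- _delta from Source B
def pyDelta (c : Char) : Int := if c = '(' then 1 else if c = ')' then -1 else 0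

-- the for-loop of Source B: state (bal, lo, hi)
def csAltStep (st : Int × Int × Int) (c : Char) : Int × Int × Int :=
  let b := st.1 + pyDelta c
  (b, min st.2.1 b, max st.2.2 b)

def check_surrounded_alt (string : String) : Bool :=
  let cs := string.toList
  if cs.length ≤ 1 then true
  else
    match cs with
    | [] => true  -- unreachable (length ≥ 2)
    | c0 :: rest =>
      let b0 := pyDelta c0
      -- string[1:-1] is rest.dropLast (exact: 1 ≤ len, so the slice drops first and last chars)
      let r := rest.dropLast.foldl csAltStep (b0, b0, b0)
      !(decide (r.2.1 ≤ 0 ∧ 0 ≤ r.2.2))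

-- ===== PRECONDITION & SPEC =====
def Spec_check_surrounded (string : String) (out : Bool) : Prop := out = check_surrounded_alt string
instance (string : String) (out : Bool) : Decidable (Spec_check_surrounded string out) := by unfold Spec_check_surrounded; infer_instance

-- ===== CLAIM (what is proved, stated in full; the proofs are below) =====
def Claim_equal_check_surrounded : Prop := ∀ (string : String), Dom_check_surrounded string → Spec_check_surrounded string (check_surrounded string)

-- ===== LEMMAS AND PROOFS =====

-- running cumulative balances (itertools.accumulate shape), used only in the proofs
def pyAccumulate (ds : List Int) (acc : Int) : List Int :=
  match ds with
  | [] => []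
  | d :: ds' => (acc + d) :: pyAccumulate ds' (acc + d)

-- A's loop decides "no running balance among indices 0..len-2 is zero"
theorem loop_eq_scan (cs : List Char) (counter : Int) (idx : Nat) :
    check_surrounded_loop cs counter idx (idx + cs.length)
      = !((pyAccumulate (cs.map pyDelta) counter).dropLast.any (fun b => b == 0)) := by
  induction cs generalizing counter idx with
  | nil => simp [check_surrounded_loop, pyAccumulate]
  | cons c rest ih =>
    have hc' : (if c = '(' then counter + 1 else if c = ')' then counter - 1 else counter)
        = counter + pyDelta c := by
      unfold pyDelta; split_ifs <;> ring
    simp only [check_surrounded_loop, List.map_cons, pyAccumulate, hc']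
    cases rest with
    | nil =>
      simp [check_surrounded_loop, pyAccumulate]
    | cons c2 rest2 =>
      have hidx : idx + (c :: c2 :: rest2).length = (idx + 1) + (c2 :: rest2).length := by
        simp; omega
      rw [hidx]
      by_cases h0 : counter + pyDelta c = 0
      · have : idx + 1 + (c2 :: rest2).length = idx + (c2 :: rest2).length.succ := by omega
        rw [this]
        simp [h0, pyAccumulate]
      · have hcond : ¬ (counter + pyDelta c = 0 ∧ idx ≠ idx + 1 + (c2 :: rest2).length - 1) := by
          intro ⟨h, _⟩; exact h0 h
        rw [if_neg hcond, ih (counter + pyDelta c) (idx + 1)]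
        simp [pyAccumulate, h0]

theorem accumulate_dropLast (ds : List Int) (b : Int) :
    (pyAccumulate ds b).dropLast = pyAccumulate ds.dropLast b := by
  induction ds generalizing b with
  | nil => simp [pyAccumulate]
  | cons d ds' ih =>
    cases ds' with
    | nil => simp [pyAccumulate]
    | cons e es =>
      have h1 : pyAccumulate (d :: e :: es) b = (b + d) :: pyAccumulate (e :: es) (b + d) := rfl
      rw [h1, List.dropLast_cons_of_ne_nil (by simp [pyAccumulate])]
      have h2 : (d :: e :: es).dropLast = d :: (e :: es).dropLast := by simp
      rw [h2]
      have h3 : pyAccumulate (d :: (e :: es).dropLast) b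
          = (b + d) :: pyAccumulate ((e :: es).dropLast) (b + d) := rfl
      rw [h3, ih (b + d)]

theorem foldl_min_le_iff (L : List Int) (a t : Int) :
    L.foldl min a ≤ t ↔ a ≤ t ∨ ∃ x ∈ L, x ≤ t := by
  induction L generalizing a with
  | nil => simp
  | cons x xs ih =>
    rw [List.foldl_cons, ih]
    constructor
    · rintro (h | ⟨y, hy, hyt⟩)
      · rcases min_le_iff.1 h with h | h
        · exact Or.inl h
        · exact Or.inr ⟨x, List.mem_cons_self, h⟩
      · exact Or.inr ⟨y, List.mem_cons_of_mem _ hy, hyt⟩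
    · rintro (h | ⟨y, hy, hyt⟩)
      · exact Or.inl (min_le_iff.2 (Or.inl h))
      · rcases List.mem_cons.1 hy with rfl | hy'
        · exact Or.inl (min_le_iff.2 (Or.inr hyt))
        · exact Or.inr ⟨y, hy', hyt⟩

theorem le_foldl_max_iff (L : List Int) (a t : Int) :
    t ≤ L.foldl max a ↔ t ≤ a ∨ ∃ x ∈ L, t ≤ x := by
  induction L generalizing a with
  | nil => simp
  | cons x xs ih =>
    rw [List.foldl_cons, ih]
    constructor
    · rintro (h | ⟨y, hy, hyt⟩)
      · rcases le_max_iff.1 h with h | h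
        · exact Or.inl h
        · exact Or.inr ⟨x, List.mem_cons_self, h⟩
      · exact Or.inr ⟨y, List.mem_cons_of_mem _ hy, hyt⟩
    · rintro (h | ⟨y, hy, hyt⟩)
      · exact Or.inl (le_max_iff.2 (Or.inl h))
      · rcases List.mem_cons.1 hy with rfl | hy'
        · exact Or.inl (le_max_iff.2 (Or.inr hyt))
        · exact Or.inr ⟨y, hy', hyt⟩

-- the fold of B computes the running min/max of the cumulative balances
theorem fold_min_max (cs : List Char) (bal lo hi : Int) :
    (cs.foldl csAltStep (bal, lo, hi)).2.1 = (pyAccumulate (cs.map pyDelta) bal).foldl min lo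
    ∧ (cs.foldl csAltStep (bal, lo, hi)).2.2 = (pyAccumulate (cs.map pyDelta) bal).foldl max hi := by
  induction cs generalizing bal lo hi with
  | nil => simp [pyAccumulate]
  | cons c rest ih =>
    simp only [List.foldl_cons, csAltStep, List.map_cons, pyAccumulate]
    exact ih (bal + pyDelta c) (min lo (bal + pyDelta c)) (max hi (bal + pyDelta c))

-- discrete intermediate value theorem for cumulative sums with steps in {1, -1, 0}
theorem accumulate_ivt (ds : List Int) (b : Int)
    (hds : ∀ d ∈ ds, d = 1 ∨ d = -1 ∨ d = 0)
    (hlo : ∃ x ∈ b :: pyAccumulate ds b, x ≤ 0)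
    (hhi : ∃ y ∈ b :: pyAccumulate ds b, 0 ≤ y) :
    0 ∈ b :: pyAccumulate ds b := by
  induction ds generalizing b with
  | nil =>
    simp only [pyAccumulate, List.mem_singleton] at hlo hhi ⊢
    obtain ⟨x, rfl, hx⟩ := hlo
    obtain ⟨y, rfl, hy⟩ := hhi
    omega
  | cons d ds' ih =>
    rcases eq_or_ne b 0 with rfl | hb
    · exact List.mem_cons_self
    have hd : d = 1 ∨ d = -1 ∨ d = 0 := hds d (List.mem_cons_self)
    have hds' : ∀ e ∈ ds', e = 1 ∨ e = -1 ∨ e = 0 := fun e he => hds e (List.mem_cons_of_mem _ he)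
    simp only [pyAccumulate] at hlo hhi ⊢
    rcases lt_or_gt_of_ne hb with hbneg | hbpos
    · -- b < 0: the ≥ 0 witness must lie in the tail; the ≤ 0 witness is b + d (since b + d ≤ b + 1 ≤ 0)
      have hhi' : ∃ y ∈ (b + d) :: pyAccumulate ds' (b + d), 0 ≤ y := by
        obtain ⟨y, hy, hy0⟩ := hhi
        rcases List.mem_cons.1 hy with rfl | hy'
        · omega
        · exact ⟨y, hy', hy0⟩
      have hlo' : ∃ x ∈ (b + d) :: pyAccumulate ds' (b + d), x ≤ 0 := by
        exact ⟨b + d, List.mem_cons_self, by omega⟩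
      exact List.mem_cons_of_mem _ (ih (b + d) hds' hlo' hhi')
    · have hlo' : ∃ x ∈ (b + d) :: pyAccumulate ds' (b + d), x ≤ 0 := by
        obtain ⟨x, hx, hx0⟩ := hlo
        rcases List.mem_cons.1 hx with rfl | hx'
        · omega
        · exact ⟨x, hx', hx0⟩
      have hhi' : ∃ y ∈ (b + d) :: pyAccumulate ds' (b + d), 0 ≤ y := by
        exact ⟨b + d, List.mem_cons_self, by omega⟩
      exact List.mem_cons_of_mem _ (ih (b + d) hds' hlo' hhi')

theorem pyDelta_cases (c : Char) : pyDelta c = 1 ∨ pyDelta c = -1 ∨ pyDelta c = 0 := by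
  unfold pyDelta; split_ifs <;> simp

-- 0 occurs among the balances iff it lies in [running min, running max]
theorem zero_mem_iff (cs : List Char) (b0 : Int) :
    (0 ∈ b0 :: pyAccumulate (cs.map pyDelta) b0)
      ↔ ((pyAccumulate (cs.map pyDelta) b0).foldl min b0 ≤ 0
          ∧ 0 ≤ (pyAccumulate (cs.map pyDelta) b0).foldl max b0) := by
  constructor
  · intro h
    rcases List.mem_cons.1 h with h0 | h0
    · constructor
      · rw [foldl_min_le_iff]; exact Or.inl (le_of_eq h0.symm)
      · rw [le_foldl_max_iff]; exact Or.inl (le_of_eq h0)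
    · constructor
      · rw [foldl_min_le_iff]; exact Or.inr ⟨0, h0, le_refl 0⟩
      · rw [le_foldl_max_iff]; exact Or.inr ⟨0, h0, le_refl 0⟩
  · rintro ⟨hlo, hhi⟩
    rw [foldl_min_le_iff] at hlo
    rw [le_foldl_max_iff] at hhi
    apply accumulate_ivt (cs.map pyDelta) b0
    · intro d hd
      obtain ⟨c, _, rfl⟩ := List.mem_map.1 hd
      exact pyDelta_cases c
    · rcases hlo with h | ⟨x, hx, hx0⟩
      · exact ⟨b0, List.mem_cons_self, h⟩
      · exact ⟨x, List.mem_cons_of_mem _ hx, hx0⟩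
    · rcases hhi with h | ⟨y, hy, hy0⟩
      · exact ⟨b0, List.mem_cons_self, h⟩
      · exact ⟨y, List.mem_cons_of_mem _ hy, hy0⟩

theorem main_eq (s : String) : check_surrounded s = check_surrounded_alt s := by
  unfold check_surrounded check_surrounded_alt
  have hA := loop_eq_scan s.toList 0 0
  simp only [Nat.zero_add] at hA
  rw [hA]
  cases h : s.toList with
  | nil => simp [pyAccumulate]
  | cons c0 rest =>
    cases rest with
    | nil => simp [pyAccumulate]
    | cons c1 rest2 =>
      simp only [List.length_cons]
      have hlen : ¬ (rest2.length + 1 + 1 ≤ 1) := by omega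
      rw [if_neg hlen]
      -- both sides are about the balances of c0 :: (c1 :: rest2).dropLast
      have hdrop : (pyAccumulate ((c0 :: c1 :: rest2).map pyDelta) 0).dropLast
          = pyAccumulate ((c0 :: (c1 :: rest2).dropLast).map pyDelta) 0 := by
        rw [accumulate_dropLast]
        have : (c0 :: c1 :: rest2).map pyDelta = pyDelta c0 :: (c1 :: rest2).map pyDelta := rfl
        rw [this]
        rw [List.dropLast_cons_of_ne_nil (by simp)]
        congr 1
        simp [List.map_dropLast]
      rw [hdrop]
      -- name the pieces
      set b0 := pyDelta c0 with hb0
      have hacc0 : pyAccumulate ((c0 :: (c1 :: rest2).dropLast).map pyDelta) 0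
          = b0 :: pyAccumulate (((c1 :: rest2).dropLast).map pyDelta) b0 := by
        simp [pyAccumulate, hb0]
      rw [hacc0]
      obtain ⟨hmin, hmax⟩ := fold_min_max ((c1 :: rest2).dropLast) b0 b0 b0
      have hmem := zero_mem_iff ((c1 :: rest2).dropLast) b0
      -- translate any (== 0) into membership
      by_cases h0 : (0 : Int) ∈ b0 :: pyAccumulate (((c1 :: rest2).dropLast).map pyDelta) b0
      · have hany : (b0 :: pyAccumulate (((c1 :: rest2).dropLast).map pyDelta) b0).any
            (fun b => b == 0) = true := by
          rw [List.any_eq_true]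
          exact ⟨0, h0, by simp⟩
        rw [hany]
        have := hmem.1 h0
        rw [← hmin, ← hmax] at this
        simp [this.1, this.2]
      · have hany : (b0 :: pyAccumulate (((c1 :: rest2).dropLast).map pyDelta) b0).any
            (fun b => b == 0) = false := by
          rw [List.any_eq_false]
          intro x hx
          simp only [beq_iff_eq]
          intro hx0; exact h0 (hx0 ▸ hx)
        rw [hany]
        have : ¬ ((pyAccumulate (((c1 :: rest2).dropLast).map pyDelta) b0).foldl min b0 ≤ 0
            ∧ 0 ≤ (pyAccumulate (((c1 :: rest2).dropLast).map pyDelta) b0).foldl max b0) := by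
          intro hc; exact h0 (hmem.2 hc)
        rw [← hmin, ← hmax] at this
        simp [this]

-- ===== VERDICT (by name: the statement is the Claim_ definition above) =====
theorem check_surrounded_spec : Claim_equal_check_surrounded := by
  intro s _
  unfold Spec_check_surrounded
  exact main_eq s
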